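-- pv_equiv track=rewrite | github.com/Vexiona/metrical-viewer | src/common.py | ictus_positions
-- ===== SOURCE A (Python) =====
-- FOOT_SIZE = {
--     'D': 3, 'S': 2, 'T': 2, 'I': 2,
--     'A': 3, 'C': 3, 'B': 3, 'b': 3, 'P': 2,
--     'l': 1, 'e': 1,
-- }
--
-- def ictus_positions(scheme, ictus='first'):
--     """Return dict mapping 1-based foot number to syllable index of its ictus."""
--     positions = {}
--     pos = 0
--     for i, code in enumerate(scheme):
--         size = FOOT_SIZE.get(code, 0)
--         idx = pos if ictus == 'first' else pos + size - 1
--         positions[i + 1] = idx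
--         pos += size
--     return positions
-- ===== SOURCE B (Python) =====
-- FOOT_SIZE = {
--     'D': 3, 'S': 2, 'T': 2, 'I': 2,
--     'A': 3, 'C': 3, 'B': 3, 'b': 3, 'P': 2,
--     'l': 1, 'e': 1,
-- }
--
-- def ictus_positions(scheme, ictus='first'):
--     """Return dict mapping 1-based foot number to syllable index of its ictus."""
--     positions = {}
--     for code in reversed(scheme):
--         size = FOOT_SIZE.get(code, 0)
--         idx = 0 if ictus == 'first' else size - 1
--         positions = {1: idx, **{k + 1: v + size for k, v in positions.items()}}
--     return positions
-- ===== Notes on version B (the rewrite author's own statement) =====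
-- stated objective: alternative
-- what changed: Replaces A's left-to-right loop with a running position accumulator by a right-to-left suffix recomputation: each step solves the tail subproblem, then rebuilds the dict shifting every foot number by one and every ictus index by the head foot's size, so no accumulator or prefix sum is ever kept.
import Mathlib
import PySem

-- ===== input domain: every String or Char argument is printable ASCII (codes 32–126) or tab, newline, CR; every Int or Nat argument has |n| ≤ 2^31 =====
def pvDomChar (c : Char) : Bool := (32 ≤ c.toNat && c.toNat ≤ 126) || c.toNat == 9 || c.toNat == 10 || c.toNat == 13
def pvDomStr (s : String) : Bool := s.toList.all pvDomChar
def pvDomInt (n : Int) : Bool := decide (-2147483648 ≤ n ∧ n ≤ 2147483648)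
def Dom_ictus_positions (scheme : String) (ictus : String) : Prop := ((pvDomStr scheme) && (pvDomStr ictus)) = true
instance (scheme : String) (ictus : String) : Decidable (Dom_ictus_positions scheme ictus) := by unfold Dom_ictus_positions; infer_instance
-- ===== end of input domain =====

-- B replaces A's left-to-right accumulator loop by a right-to-left suffix rebuild:
-- each step solves the tail subproblem, then shifts every foot number by 1 and every
-- index by the head foot's size; alternative decomposition, no claim of speed.


-- ===== PORT A =====
def FOOT_SIZE : PySem.Dict Char Int :=
  ⟨[('D', 3), ('S', 2), ('T', 2), ('I', 2),
    ('A', 3), ('C', 3), ('B', 3), ('b', 3), ('P', 2),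
    ('l', 1), ('e', 1)]⟩

def ictus_positions (scheme : String) (ictus : String) : List (Int × Int) :=
  let st := (PySem.List.enumerate scheme.toList 0).foldl
    (fun (st : PySem.Dict Int Int × Int) p =>
      let size := PySem.Dict.getD FOOT_SIZE p.2 0
      let idx := if ictus = "first" then st.2 else st.2 + size - 1
      (PySem.Dict.insert st.1 (p.1 + 1) idx, st.2 + size))
    (⟨[]⟩, 0)
  st.1.items

-- ===== PORT B =====
def ictus_positions_alt (scheme : String) (ictus : String) : List (Int × Int) :=
  (scheme.toList.reverse.foldl
    (fun (positions : PySem.Dict Int Int) code =>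
      let size := PySem.Dict.getD FOOT_SIZE code 0
      let idx : Int := if ictus = "first" then 0 else size - 1
      -- {1: idx, **{k + 1: v + size for k, v in positions.items()}}
      (positions.items.map (fun p => (p.1 + 1, p.2 + size))).foldl
        (fun d p => PySem.Dict.insert d p.1 p.2)
        (PySem.Dict.insert ⟨[]⟩ 1 idx))
    ⟨[]⟩).items

-- ===== PRECONDITION & SPEC =====
def Spec_ictus_positions (scheme : String) (ictus : String) (out : List (Int × Int)) : Prop := out = ictus_positions_alt scheme ictus
instance (scheme : String) (ictus : String) (out : List (Int × Int)) : Decidable (Spec_ictus_positions scheme ictus out) := by unfold Spec_ictus_positions; infer_instance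

-- ===== CLAIM (what is proved, stated in full; the proofs are below) =====
def Claim_equal_ictus_positions : Prop := ∀ (scheme : String) (ictus : String), Dom_ictus_positions scheme ictus → Spec_ictus_positions scheme ictus (ictus_positions scheme ictus)

-- ===== LEMMAS AND PROOFS =====

-- common intermediate form: the list of (foot number, ictus index) pairs, driven by the sizes
def pvG (ictus : String) : List Int → Int → Int → List (Int × Int)
  | [], _, _ => []
  | s :: ss, i, pos =>
    (i + 1, if ictus = "first" then pos else pos + s - 1) :: pvG ictus ss (i + 1) (pos + s)

-- every foot number in pvG exceeds the starting index
lemma pvG_keys (ictus : String) (sz : List Int) (i pos : Int) :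
    ∀ p ∈ pvG ictus sz i pos, i < p.1 := by
  induction sz generalizing i pos with
  | nil => simp [pvG]
  | cons s ss ih =>
    intro p hp
    simp only [pvG, List.mem_cons] at hp
    rcases hp with hp | hp
    · subst hp; simp
    · have := ih (i + 1) (pos + s) p hp; omega

-- foot numbers in pvG are strictly increasing
lemma pvG_pairwise (ictus : String) (sz : List Int) (i pos : Int) :
    (pvG ictus sz i pos).Pairwise (fun a b => a.1 < b.1) := by
  induction sz generalizing i pos with
  | nil => simp [pvG]
  | cons s ss ih =>
    refine List.Pairwise.cons ?_ (ih _ _)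
    intro q hq
    have := pvG_keys ictus ss (i + 1) (pos + s) q hq
    omega

-- shifting all foot numbers and indices of pvG
lemma pvG_map_shift (ictus : String) (sz : List Int) (i pos a b : Int) :
    (pvG ictus sz i pos).map (fun q => (q.1 + a, q.2 + b)) = pvG ictus sz (i + a) (pos + b) := by
  induction sz generalizing i pos with
  | nil => simp [pvG]
  | cons s ss ih =>
    simp only [pvG, List.map_cons, ih]
    refine List.cons_eq_cons.mpr ⟨?_, ?_⟩
    · simp only [Prod.mk.injEq]
      refine ⟨by ring, ?_⟩
      split_ifs <;> ring
    · congr 1 <;> ring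

-- inserting a key strictly larger than every key present appends
lemma pvInsert_fresh (d : PySem.Dict Int Int) (k : Int) (v : Int)
    (h : ∀ p ∈ d.items, p.1 < k) :
    PySem.Dict.insert d k v = ⟨d.items ++ [(k, v)]⟩ := by
  have hc : d.contains k = false := by
    simp only [PySem.Dict.contains, List.any_eq_false]
    intro p hp
    have := h p hp
    simp only [beq_iff_eq]
    omega
  simp [PySem.Dict.insert, hc]

-- folding inserts of strictly increasing fresh keys appends the list
lemma pvFoldInsert (l : List (Int × Int)) (d : PySem.Dict Int Int)
    (hfresh : ∀ p ∈ d.items, ∀ q ∈ l, p.1 < q.1)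
    (hpair : l.Pairwise (fun a b => a.1 < b.1)) :
    (l.foldl (fun d p => PySem.Dict.insert d p.1 p.2) d).items = d.items ++ l := by
  induction l generalizing d with
  | nil => simp
  | cons q qs ih =>
    simp only [List.foldl_cons]
    rw [pvInsert_fresh d q.1 q.2 (fun p hp => hfresh p hp q (by simp))]
    rw [ih _ ?_ (List.Pairwise.of_cons hpair)]
    · simp
    · intro p hp r hr
      rcases List.mem_append.1 hp with h1 | h1
      · exact hfresh p h1 r (List.mem_cons_of_mem _ hr)
      · simp only [List.mem_singleton] at h1; subst h1
        exact (List.pairwise_cons.1 hpair).1 r hr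

-- A's fold over enumerate produces pvG, appended to the accumulated dict
lemma pvA_fold (ictus : String) (l : List Char) (i0 : Int) (d : PySem.Dict Int Int) (pos : Int)
    (h : ∀ p ∈ d.items, p.1 ≤ i0) :
    ((PySem.List.enumerate l i0).foldl
      (fun (st : PySem.Dict Int Int × Int) p =>
        let size := PySem.Dict.getD FOOT_SIZE p.2 0
        let idx := if ictus = "first" then st.2 else st.2 + size - 1
        (PySem.Dict.insert st.1 (p.1 + 1) idx, st.2 + size))
      (d, pos)).1.items
    = d.items ++ pvG ictus (l.map (fun c => PySem.Dict.getD FOOT_SIZE c 0)) i0 pos := by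
  induction l generalizing i0 d pos with
  | nil => simp [PySem.List.enumerate, pvG]
  | cons c cs ih =>
    rw [PySem.List.enumerate_cons]
    simp only [List.foldl_cons]
    rw [pvInsert_fresh d (i0 + 1) _ (fun p hp => by have := h p hp; omega)]
    rw [ih (i0 + 1) _ _ ?_]
    · simp [pvG]
    · intro p hp
      rcases List.mem_append.1 hp with h1 | h1
      · have := h p h1; omega
      · simp only [List.mem_singleton] at h1; subst h1; simp

-- B's right-to-left fold produces pvG for the whole list of sizes
lemma pvB_fold (ictus : String) (l : List Char) :
    (l.foldr
      (fun code (positions : PySem.Dict Int Int) =>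
        let size := PySem.Dict.getD FOOT_SIZE code 0
        let idx : Int := if ictus = "first" then 0 else size - 1
        (positions.items.map (fun p => (p.1 + 1, p.2 + size))).foldl
          (fun d p => PySem.Dict.insert d p.1 p.2)
          (PySem.Dict.insert ⟨[]⟩ 1 idx))
      ⟨[]⟩).items
    = pvG ictus (l.map (fun c => PySem.Dict.getD FOOT_SIZE c 0)) 0 0 := by
  induction l with
  | nil => simp [pvG]
  | cons c cs ih =>
    simp only [List.foldr_cons, List.map_cons]
    set s := PySem.Dict.getD FOOT_SIZE c 0 with hs
    rw [ih]
    have hshift : (pvG ictus (cs.map (fun c => PySem.Dict.getD FOOT_SIZE c 0)) 0 0).map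
        (fun p => (p.1 + 1, p.2 + s)) = pvG ictus (cs.map (fun c => PySem.Dict.getD FOOT_SIZE c 0)) 1 s := by
      rw [pvG_map_shift]; norm_num
    rw [hshift]
    have hd0 : (PySem.Dict.insert (⟨[]⟩ : PySem.Dict Int Int) 1 (if ictus = "first" then 0 else s - 1)).items
        = [(1, if ictus = "first" then 0 else s - 1)] := by
      simp [PySem.Dict.insert, PySem.Dict.contains]
    have hfr : ∀ p ∈ (PySem.Dict.insert (⟨[]⟩ : PySem.Dict Int Int) 1 (if ictus = "first" then 0 else s - 1)).items,
        ∀ q ∈ pvG ictus (cs.map (fun c => PySem.Dict.getD FOOT_SIZE c 0)) 1 s, p.1 < q.1 := by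
      intro p hp q hq
      rw [hd0] at hp
      simp only [List.mem_singleton] at hp; subst hp
      exact pvG_keys ictus _ 1 s q hq
    rw [pvFoldInsert _ _ hfr (pvG_pairwise ictus _ 1 s), hd0]
    simp only [pvG, List.singleton_append]
    norm_num

-- ===== VERDICT (by name: the statement is the Claim_ definition above) =====
theorem ictus_positions_spec : Claim_equal_ictus_positions := by
  intro scheme ictus _
  unfold Spec_ictus_positions
  simp only [ictus_positions, ictus_positions_alt]
  rw [pvA_fold ictus scheme.toList 0 ⟨[]⟩ 0 (by simp), List.foldl_reverse]
  rw [pvB_fold]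
  rfl
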